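-- pv_equiv track=rewrite | github.com/M3RG-IITD/DiSCoMaT | code/gnn_1/utils.py | get_max_freq_feat
-- ===== SOURCE A (Python) =====
-- from collections import defaultdict, Counter
--
-- def get_max_freq_feat(table):
--     max_freq_feat = []
--     for r in table:
--         cnt = Counter()
--         for cell in r:
--             if cell: cnt[cell] += 1
--         max_freq_feat.append(cnt.most_common(1)[0][1] if cnt else 1)
--     for j in range(len(table[0])):
--         cnt = Counter()
--         for i in range(len(table)):
--             cell = table[i][j]
--             if cell: cnt[cell] += 1
--         max_freq_feat.append(cnt.most_common(1)[0][1] if cnt else 1)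
--     return max_freq_feat
-- ===== SOURCE B (Python) =====
-- def get_max_freq_feat(table):
--     ncols = len(table[0])
--     row_cnts = []
--     col_cnts = [{} for _ in range(ncols)]
--     for row in table:
--         rc = {}
--         for j, cell in enumerate(row):
--             if cell:
--                 rc[cell] = rc.get(cell, 0) + 1
--                 if j < ncols:
--                     c = col_cnts[j]
--                     c[cell] = c.get(cell, 0) + 1
--         row_cnts.append(rc)
--     return [max(c.values(), default=1) for c in row_cnts + col_cnts]
-- ===== Notes on version B (the rewrite author's own statement) =====
-- stated objective: alternative
-- what changed: A runs two staged passes (per-row Counters, then columns re-scanned by index) each reduced with most_common(1); B makes one merged pass over the cells that updates the row counter and a per-column dict list together, then one uniform max(values, default=1) reduction over row and column counters.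
import Mathlib
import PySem

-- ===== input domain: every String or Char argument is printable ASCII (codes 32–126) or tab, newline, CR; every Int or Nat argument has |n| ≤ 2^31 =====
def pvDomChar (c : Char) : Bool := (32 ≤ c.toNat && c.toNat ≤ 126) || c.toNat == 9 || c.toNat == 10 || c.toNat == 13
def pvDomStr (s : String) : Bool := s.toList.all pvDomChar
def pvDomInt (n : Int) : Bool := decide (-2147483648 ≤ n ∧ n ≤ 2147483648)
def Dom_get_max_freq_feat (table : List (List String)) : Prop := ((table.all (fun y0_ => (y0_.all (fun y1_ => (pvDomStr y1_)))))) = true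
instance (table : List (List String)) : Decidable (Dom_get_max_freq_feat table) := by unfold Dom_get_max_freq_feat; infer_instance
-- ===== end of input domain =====

-- B makes a SINGLE merged pass over the cells, updating the row counter and the per-column
-- counter list together, then one uniform reduction max(values, default=1); A runs two
-- separate staged passes (rows, then columns re-scanned by index) each ending in
-- Counter.most_common(1). Objective: alternative decomposition (not claimed faster).

-- ===== PORT A =====
def get_max_freq_feat (table : List (List String)) : List Int :=
  let max_freq_feat : List Int := table.foldl (fun acc r =>
    let cnt := r.foldl (fun d cell => if cell ≠ "" then d.modify cell 0 (· + 1) else d) PySem.Dict.empty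
    acc ++ [if cnt.items ≠ [] then ((PySem.List.sorted cnt.items (fun p => p.2) true).headD ("", 0)).2 else 1]) []
  (PySem.List.pyRange 0 (PySem.List.len (table.headD []))).foldl (fun acc j =>
    let cnt := (PySem.List.pyRange 0 (PySem.List.len table)).foldl (fun d i =>
      let cell := PySem.List.pyGetD (PySem.List.pyGetD table i []) j ""
      if cell ≠ "" then d.modify cell 0 (· + 1) else d) PySem.Dict.empty
    acc ++ [if cnt.items ≠ [] then ((PySem.List.sorted cnt.items (fun p => p.2) true).headD ("", 0)).2 else 1]) max_freq_feat

-- ===== PORT B =====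
-- c[cell] = c.get(cell, 0) + 1
def pvBump (d : PySem.Dict String Int) (cell : String) : PySem.Dict String Int :=
  d.insert cell (d.getD cell 0 + 1)

-- body of 'for j, cell in enumerate(row)': bump rc with the cell, and col_cnts[j] when j < ncols
def pvInnerStep (ncols : Int) (p : PySem.Dict String Int × List (PySem.Dict String Int))
    (jc : Int × String) : PySem.Dict String Int × List (PySem.Dict String Int) :=
  if jc.2 ≠ "" then
    if jc.1 < ncols then
      (pvBump p.1 jc.2, p.2.set jc.1.toNat (pvBump (p.2.getD jc.1.toNat PySem.Dict.empty) jc.2))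
    else (pvBump p.1 jc.2, p.2)
  else p

-- body of 'for row in table': run the merged cell pass, append rc to row_cnts
def pvRowStep (ncols : Int) (st : List (PySem.Dict String Int) × List (PySem.Dict String Int))
    (row : List String) : List (PySem.Dict String Int) × List (PySem.Dict String Int) :=
  let inner := (PySem.List.enumerate row).foldl (pvInnerStep ncols) (PySem.Dict.empty, st.2)
  (st.1 ++ [inner.1], inner.2)

def get_max_freq_feat_alt (table : List (List String)) : List Int :=
  let ncols : Int := PySem.List.len (table.headD [])
  let st := table.foldl (pvRowStep ncols)
    ([], (PySem.List.pyRange 0 ncols).map (fun _ => PySem.Dict.empty))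
  (st.1 ++ st.2).map (fun c => PySem.List.maxD c.values (fun x => x) 1)

-- ===== PRECONDITION & SPEC =====
-- Pre_ excludes exactly the inputs where the Python A raises IndexError: the empty table (table[0])
-- and tables whose later rows are shorter than row 0 (table[i][j] for j < len(table[0])).
def Pre_get_max_freq_feat (table : List (List String)) : Prop :=
  table ≠ [] ∧ ∀ r ∈ table, (table.headD []).length ≤ r.length
instance (table : List (List String)) : Decidable (Pre_get_max_freq_feat table) := by unfold Pre_get_max_freq_feat; infer_instance
def pvWitness_get_max_freq_feat : List (List String) := [["a", "b"], ["a", ""]]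
def Spec_get_max_freq_feat (table : List (List String)) (out : List Int) : Prop := out = get_max_freq_feat_alt table
instance (table : List (List String)) (out : List Int) : Decidable (Spec_get_max_freq_feat table out) := by unfold Spec_get_max_freq_feat; infer_instance

-- ===== CLAIM (what is proved, stated in full; the proofs are below) =====
def Claim_equal_get_max_freq_feat : Prop := ∀ (table : List (List String)), Dom_get_max_freq_feat table → Pre_get_max_freq_feat table → Spec_get_max_freq_feat table (get_max_freq_feat table)

-- ===== LEMMAS AND PROOFS =====

-- the conditional bump of one cell (if cell: c[cell] = c.get(cell,0)+1)
def pvStep (d : PySem.Dict String Int) (cell : String) : PySem.Dict String Int :=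
  if cell ≠ "" then pvBump d cell else d

-- the effect of one row on the column-counter list: bump position i with the i-th cell
def pvUpdRow : List (PySem.Dict String Int) → List String → List (PySem.Dict String Int)
  | cols, [] => cols
  | [], _ => []
  | c :: cs, x :: xs => pvStep c x :: pvUpdRow cs xs

lemma pvUpdRow_nil (r : List String) : pvUpdRow [] r = [] := by cases r <;> rfl

lemma pvUpdRow_cons (c : PySem.Dict String Int) (cs : List (PySem.Dict String Int))
    (x : String) (xs : List String) :
    pvUpdRow (c :: cs) (x :: xs) = pvStep c x :: pvUpdRow cs xs := rfl

lemma pvUpdRow_length (cols : List (PySem.Dict String Int)) (r : List String) :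
    (pvUpdRow cols r).length = cols.length := by
  fun_induction pvUpdRow cols r <;> simp [*]

lemma pvUpdRow_getElem? (cols : List (PySem.Dict String Int)) (r : List String) (j : Nat)
    (hj : j < cols.length) (hr : cols.length ≤ r.length) :
    (pvUpdRow cols r)[j]? = some (pvStep (cols.getD j PySem.Dict.empty) (r.getD j "")) := by
  induction cols generalizing r j with
  | nil => simp at hj
  | cons c cs ih =>
    cases r with
    | nil => simp at hr
    | cons x xs =>
      cases j with
      | zero => simp [pvUpdRow]
      | succ j =>
        simp only [pvUpdRow, List.getElem?_cons_succ, List.getD, List.getElem?_cons_succ]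
        exact ih xs j (by simpa using hj) (by simpa using hr)

-- A's conditional counting loop is Counter() over the truthy cells
lemma cntfold_eq (vs : List String) :
    vs.foldl (fun d cell => if cell ≠ "" then d.modify cell 0 (· + 1) else d) PySem.Dict.empty
      = PySem.Dict.counter (vs.filter (fun c => c ≠ "")) := by
  rw [PySem.Dict.counter_eq_foldl, List.foldl_filter]
  simp

-- B's conditional bump loop is the same Counter
lemma stepfold_eq (vs : List String) :
    vs.foldl pvStep PySem.Dict.empty = PySem.Dict.counter (vs.filter (fun c => c ≠ "")) := by
  rw [← PySem.Dict.foldl_insert_getD_add_one_eq_counter, List.foldl_filter]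
  congr 1
  funext d c
  by_cases h : c = "" <;> simp [pvStep, pvBump, h]

-- A's column counting loop over indices is Counter() over the truthy cells of the j-th column
lemma colcnt_eq (table : List (List String)) (j : Int) :
    (PySem.List.pyRange 0 (PySem.List.len table)).foldl (fun d i =>
        let cell := PySem.List.pyGetD (PySem.List.pyGetD table i []) j ""
        if cell ≠ "" then d.modify cell 0 (· + 1) else d) PySem.Dict.empty
      = PySem.Dict.counter ((table.map (fun row => PySem.List.pyGetD row j "")).filter (fun c => c ≠ "")) := by
  simp only [ne_eq]
  have h1 := List.foldl_map (f := fun i => PySem.List.pyGetD table i ([] : List String))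
      (g := fun (d : PySem.Dict String Int) row => if ¬ PySem.List.pyGetD row j "" = "" then
          d.modify (PySem.List.pyGetD row j "") 0 (· + 1) else d)
      (l := PySem.List.pyRange 0 (PySem.List.len table)) (init := PySem.Dict.empty)
  beta_reduce at h1
  rw [← h1, PySem.List.map_pyGetD_pyRange_zero, ← cntfold_eq, List.foldl_map]

-- most_common(1)[0][1] (or 1) equals max(values, default=1)
lemma feat_eq (vs : List String) :
    (if (PySem.Dict.counter vs).items ≠ [] then
        ((PySem.List.sorted (PySem.Dict.counter vs).items (fun p : String × Int => p.2) true).headD ("", 0)).2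
      else 1) = PySem.List.maxD (PySem.Dict.counter vs).values (fun x => x) 1 := by
  cases hvs : vs with
  | nil => rfl
  | cons v t =>
    have hv : v ∈ PySem.Set.ofList vs := (PySem.Set.mem_ofList vs v).2 (by rw [hvs]; simp)
    rw [← hvs]
    have hitems : (PySem.Dict.counter vs).items ≠ [] := by
      intro h
      rw [PySem.Dict.items_counter] at h
      rw [List.map_eq_nil_iff.1 h] at hv
      simp at hv
    rw [if_pos hitems]
    obtain ⟨m, tl, hs⟩ : ∃ m tl, PySem.List.sorted (PySem.Dict.counter vs).items (fun p : String × Int => p.2) true = m :: tl := by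
      cases hsort : PySem.List.sorted (PySem.Dict.counter vs).items (fun p : String × Int => p.2) true with
      | nil => exact absurd ((PySem.List.sorted_eq_nil_iff _ _ _).1 hsort) hitems
      | cons a b => exact ⟨a, b, rfl⟩
    rw [hs]
    have hvals : (PySem.Dict.counter vs).values = (PySem.Dict.counter vs).items.map (·.2) := rfl
    have hvne : (PySem.Dict.counter vs).values ≠ [] := by
      rw [hvals]; simpa using hitems
    unfold PySem.List.maxD
    cases hmax : PySem.List.max? (PySem.Dict.counter vs).values (fun x => x) with
    | none => exact absurd ((PySem.List.max?_eq_none_iff _ _).1 hmax) hvne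
    | some M =>
      simp only [List.headD, Option.getD]
      have hmge : ∀ y ∈ (PySem.Dict.counter vs).items, y.2 ≤ m.2 :=
        PySem.List.key_head_sorted_rev_ge _ _ hs
      have hmem : m ∈ (PySem.Dict.counter vs).items := by
        rw [← PySem.List.mem_sorted _ (fun p : String × Int => p.2) true, hs]
        exact List.mem_cons_self
      have hMmax : ∀ y ∈ (PySem.Dict.counter vs).values, y ≤ M :=
        PySem.List.max?_isMax hmax
      have hMmem : M ∈ (PySem.Dict.counter vs).values := PySem.List.max?_mem hmax
      have h1 : m.2 ≤ M := by
        apply hMmax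
        rw [hvals]
        exact List.mem_map.2 ⟨m, hmem, rfl⟩
      have h2 : M ≤ m.2 := by
        rw [hvals] at hMmem
        obtain ⟨p, hp, hpM⟩ := List.mem_map.1 hMmem
        rw [← hpM]
        exact hmge p hp
      omega

lemma pv_set_take_drop (cols : List (PySem.Dict String Int)) (k : Nat)
    (v : PySem.Dict String Int) (hk : k < cols.length) :
    (cols.set k v).take (k + 1) = cols.take k ++ [v] ∧
      (cols.set k v).drop (k + 1) = cols.drop (k + 1) := by
  induction cols generalizing k with
  | nil => simp at hk
  | cons c cs ih =>
    cases k with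
    | zero => simp
    | succ k =>
      obtain ⟨h1, h2⟩ := ih k (by simpa using hk)
      simp [h1, h2]

-- the merged cell pass over enumerate(row): the rc component counts the whole row, the
-- column component is pvUpdRow on the suffix of the column list at the enumeration base
lemma pv_inner (N : Nat) (row : List String) :
    ∀ (k : Nat) (rc : PySem.Dict String Int) (cols : List (PySem.Dict String Int)),
      cols.length = N →
      (PySem.List.enumerate row (k : Int)).foldl (pvInnerStep (N : Int)) (rc, cols)
      = (row.foldl pvStep rc, cols.take k ++ pvUpdRow (cols.drop k) row) := by
  induction row with
  | nil =>
    intro k rc cols hlen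
    simp [PySem.List.enumerate_nil, pvUpdRow, List.take_append_drop]
  | cons x xs ih =>
    intro k rc cols hlen
    rw [PySem.List.enumerate_cons, List.foldl_cons]
    have hcast : ((k : Int) + 1) = ((k + 1 : Nat) : Int) := by push_cast; ring
    by_cases hk : k < N
    · -- index in column range
      have hkc : k < cols.length := by omega
      have hdrop : cols.drop k = cols[k] :: cols.drop (k + 1) := List.drop_eq_getElem_cons hkc
      have htklen : (cols.take k).length = k := by simp [List.length_take]; omega
      have htk : cols.take (k + 1) = cols.take k ++ [cols[k]] := by
        rw [List.take_add_one, List.getElem?_eq_getElem hkc]; rfl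
      by_cases hx : x = ""
      · simp only [pvInnerStep, hx, ne_eq, not_true_eq_false, if_false]
        rw [hcast, ih (k + 1) rc cols hlen]
        congr 1
        rw [htk, hdrop, pvUpdRow_cons, List.append_assoc]
        simp [pvStep]
      · have hki : ((k : Int) < (N : Int)) := by exact_mod_cast hk
        simp only [pvInnerStep, ne_eq, hx, not_false_eq_true, if_true, hki, Int.toNat_natCast]
        set v := pvBump (cols.getD k PySem.Dict.empty) x with hv
        have hlen' : (cols.set k v).length = N := by simp [hlen]
        rw [hcast, ih (k + 1) (pvBump rc x) (cols.set k v) hlen']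
        congr 1
        · simp [pvStep, hx]
        · obtain ⟨htake, hdrop'⟩ := pv_set_take_drop cols k v hkc
          rw [htake, hdrop', hdrop, pvUpdRow_cons]
          have : pvStep cols[k] x = v := by
            rw [hv, List.getD_eq_getElem cols _ hkc]
            simp [pvStep, hx]
          rw [this, List.append_assoc]
          rfl
    · -- index past the column range: columns untouched
      have h1 : cols.drop k = [] := List.drop_eq_nil_of_le (by omega)
      have h2 : cols.drop (k + 1) = [] := List.drop_eq_nil_of_le (by omega)
      have h3 : cols.take k = cols := List.take_of_length_le (by omega)
      have h4 : cols.take (k + 1) = cols := List.take_of_length_le (by omega)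
      have hki : ¬ ((k : Int) < (N : Int)) := by exact_mod_cast hk
      by_cases hx : x = ""
      · simp only [pvInnerStep, hx, ne_eq, not_true_eq_false, if_false]
        rw [hcast, ih (k + 1) rc cols hlen]
        simp [h1, h2, h3, h4, pvUpdRow_nil, pvStep]
      · simp only [pvInnerStep, ne_eq, hx, not_false_eq_true, if_true, hki, if_false]
        rw [hcast, ih (k + 1) (pvBump rc x) cols hlen]
        simp [h1, h2, h3, h4, pvUpdRow_nil, pvStep, hx]

-- the outer fold: rows accumulate their own counters, the column list folds through pvUpdRow
lemma pv_outer (N : Nat) (table : List (List String)) :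
    ∀ (rows cols : List (PySem.Dict String Int)), cols.length = N →
      table.foldl (pvRowStep (N : Int)) (rows, cols)
      = (rows ++ table.map (fun r => r.foldl pvStep PySem.Dict.empty), table.foldl pvUpdRow cols) := by
  induction table with
  | nil => intro rows cols hlen; simp
  | cons r t ih =>
    intro rows cols hlen
    rw [List.foldl_cons, List.foldl_cons, List.map_cons]
    have h0 : PySem.List.enumerate r = PySem.List.enumerate r ((0 : Nat) : Int) := by norm_num
    have hstep : pvRowStep ((N : Nat) : Int) (rows, cols) r
        = (rows ++ [r.foldl pvStep PySem.Dict.empty], pvUpdRow cols r) := by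
      unfold pvRowStep
      rw [h0, pv_inner N r 0 PySem.Dict.empty cols hlen]
      simp
    rw [hstep, ih (rows ++ [r.foldl pvStep PySem.Dict.empty]) (pvUpdRow cols r)
        (by rw [pvUpdRow_length]; exact hlen)]
    simp

lemma pv_foldl_updRow_length (table : List (List String)) (cols : List (PySem.Dict String Int)) :
    (table.foldl pvUpdRow cols).length = cols.length := by
  induction table generalizing cols with
  | nil => rfl
  | cons r t ih => rw [List.foldl_cons, ih, pvUpdRow_length]

-- pointwise: the folded column list holds, at j, the fold of pvStep over the j-th column
lemma pv_cols (table : List (List String)) :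
    ∀ (cols : List (PySem.Dict String Int)) (j : Nat), j < cols.length →
      (∀ r ∈ table, cols.length ≤ r.length) →
      (table.foldl pvUpdRow cols)[j]? =
        some ((table.map (fun r => r.getD j "")).foldl pvStep (cols.getD j PySem.Dict.empty)) := by
  induction table with
  | nil =>
    intro cols j hj _
    simp [List.getElem?_eq_getElem hj]
  | cons r t ih =>
    intro cols j hj hlen
    rw [List.foldl_cons, List.map_cons, List.foldl_cons]
    have hj' : j < (pvUpdRow cols r).length := by rw [pvUpdRow_length]; exact hj
    have hgd : (pvUpdRow cols r).getD j PySem.Dict.empty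
        = pvStep (cols.getD j PySem.Dict.empty) (r.getD j "") := by
      have := pvUpdRow_getElem? cols r j hj (hlen r List.mem_cons_self)
      rw [List.getD_eq_getElem?_getD, this]; rfl
    rw [ih (pvUpdRow cols r) j hj'
        (fun r' hr' => by rw [pvUpdRow_length]; exact hlen r' (List.mem_cons_of_mem _ hr')), hgd]

theorem pv_main (table : List (List String)) (hpre : Pre_get_max_freq_feat table) :
    get_max_freq_feat table = get_max_freq_feat_alt table := by
  obtain ⟨hne, hrows⟩ := hpre
  unfold get_max_freq_feat get_max_freq_feat_alt
  simp only [PySem.List.foldl_append_singleton_eq_map, List.nil_append]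
  have hlenN : PySem.List.len (table.headD []) = (((table.headD []).length : Nat) : Int) := by
    simp [PySem.List.len]
  set N : Nat := (table.headD []).length with hN
  have hinitlen : ((PySem.List.pyRange 0 ((N : Nat) : Int)).map
      (fun _ => (PySem.Dict.empty : PySem.Dict String Int))).length = N := by
    rw [PySem.List.pyRange_zero_natCast]
    simp
  rw [hlenN, pv_outer N table [] _ hinitlen]
  simp only [List.nil_append, List.map_append]
  congr 1
  · -- row features
    rw [List.map_map]
    refine List.map_congr_left (fun r _ => ?_)
    simp only [Function.comp]
    rw [cntfold_eq, stepfold_eq, feat_eq]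
  · -- column features
    set init : List (PySem.Dict String Int) := (PySem.List.pyRange 0 ((N : Nat) : Int)).map
      (fun _ => (PySem.Dict.empty : PySem.Dict String Int)) with hinit
    apply List.ext_getElem?
    intro j
    rw [List.getElem?_map, List.getElem?_map]
    by_cases hj : j < N
    · have hjr : j < (PySem.List.pyRange 0 ((N : Nat) : Int)).length := by
        rw [PySem.List.pyRange_zero_natCast]; simpa using hj
      rw [List.getElem?_eq_getElem hjr,
        pv_cols table init j (by rw [hinitlen]; exact hj)
          (fun r hr => by rw [hinitlen]; exact hrows r hr)]
      simp only [Option.map_some, Option.some.injEq]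
      have hjel : (PySem.List.pyRange 0 ((N : Nat) : Int))[j] = ((j : Nat) : Int) := by
        simp [PySem.List.pyRange_zero_natCast, List.getElem_map,
          List.getElem_range (by simpa using hjr)]
      rw [hjel, colcnt_eq]
      have hgd0 : init.getD j PySem.Dict.empty = PySem.Dict.empty := by
        rw [List.getD_eq_getElem init _ (by rw [hinitlen]; exact hj)]
        simp [hinit]
      have hcol : (table.map (fun row => PySem.List.pyGetD row ((j : Nat) : Int) ""))
          = table.map (fun r => r.getD j "") := by
        apply List.map_congr_left
        intro r _
        rw [PySem.List.pyGetD_natCast]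
      rw [hcol, hgd0, stepfold_eq, feat_eq]
    · have h1 : (PySem.List.pyRange 0 ((N : Nat) : Int))[j]? = none := by
        rw [List.getElem?_eq_none]
        rw [PySem.List.pyRange_zero_natCast]; simpa using not_lt.1 hj
      have h2 : (table.foldl pvUpdRow init)[j]? = none := by
        rw [List.getElem?_eq_none]
        rw [pv_foldl_updRow_length, hinitlen]; exact not_lt.1 hj
      rw [h1, h2]; rfl

-- ===== VERDICT (by name: the statement is the Claim_ definition above) =====
theorem get_max_freq_feat_spec : Claim_equal_get_max_freq_feat := by
  intro table _ hpre
  exact pv_main table hpre
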